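-- pv_equiv track=rewrite | github.com/stefanprati-rgb/raizen | scripts/runners/reprocess_cpfl_full.py | parse_data_extenso
-- ===== SOURCE A (Python) =====
-- MESES = {
--     'jan': '01', 'janeiro': '01', 'fev': '02', 'fevereiro': '02',
--     'mar': '03', 'março': '03', 'abr': '04', 'abril': '04',
--     'mai': '05', 'maio': '05', 'jun': '06', 'junho': '06',
--     'jul': '07', 'julho': '07', 'ago': '08', 'agosto': '08',
--     'set': '09', 'setembro': '09', 'out': '10', 'outubro': '10',
--     'nov': '11', 'novembro': '11', 'dez': '12', 'dezembro': '12'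
-- }
--
-- def parse_data_extenso(data_str):
--     if not data_str: return None
--     try:
--         parts = data_str.lower().replace(' de ', ' ').split()
--         if len(parts) < 3: return None
--         dia, mes_ext, ano = parts[0], parts[1], parts[-1]
--         for chave, valor in MESES.items():
--             if mes_ext.startswith(chave):
--                 return f"{dia.zfill(2)}/{valor}/{ano}"
--         # Tentar dd/mm/aaaa direto
--         if '/' in data_str:
--              return data_str.strip()
--     except:
--         return None
--     return None
-- ===== SOURCE B (Python) =====
-- _TABELA = "janfevmarabrmaijunjulagosetoutnovdez"
--
-- def parse_data_extenso(data_str):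
--     if not data_str:
--         return None
--     parts = data_str.lower().replace(' de ', ' ').split()
--     if len(parts) < 3:
--         return None
--     dia, mes_ext, ano = parts[0], parts[1], parts[-1]
--     p = mes_ext[:3]
--     idx = _TABELA.find(p)
--     if len(p) == 3 and idx != -1 and idx % 3 == 0:
--         return f"{dia.zfill(2)}/{str(idx // 3 + 1).zfill(2)}/{ano}"
--     if '/' in data_str:
--         return data_str.strip()
--     return None
-- ===== Notes on version B (the rewrite author's own statement) =====
-- stated objective: alternative
-- what changed: Replaces A's 24-entry dict and startswith scan by a packed 36-char month-table string: the month number is computed arithmetically as find(prefix)//3+1 from the aligned position of the 3-letter prefix in that string, with no month dictionary at all.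
import Mathlib
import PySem

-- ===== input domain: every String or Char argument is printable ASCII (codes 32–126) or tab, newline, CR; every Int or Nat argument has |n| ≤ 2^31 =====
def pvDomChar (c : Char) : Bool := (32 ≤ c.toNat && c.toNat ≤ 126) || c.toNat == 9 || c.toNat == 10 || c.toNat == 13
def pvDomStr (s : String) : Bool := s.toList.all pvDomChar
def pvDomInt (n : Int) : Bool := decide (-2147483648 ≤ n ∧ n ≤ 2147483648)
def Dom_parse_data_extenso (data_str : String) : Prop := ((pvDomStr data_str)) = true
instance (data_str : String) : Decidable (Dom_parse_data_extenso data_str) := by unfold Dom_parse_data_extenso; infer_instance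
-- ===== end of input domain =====

-- B drops A's 24-entry month dictionary and startswith scan entirely: it computes the month
-- NUMBER arithmetically, as find(prefix)//3 + 1 from the aligned position of the 3-letter month
-- prefix inside one packed 36-character table string (alternative algorithm; same return value).

-- ===== PORT A =====
def pvMESES : List (String × String) :=
  [("jan", "01"), ("janeiro", "01"), ("fev", "02"), ("fevereiro", "02"),
   ("mar", "03"), ("março", "03"), ("abr", "04"), ("abril", "04"),
   ("mai", "05"), ("maio", "05"), ("jun", "06"), ("junho", "06"),
   ("jul", "07"), ("julho", "07"), ("ago", "08"), ("agosto", "08"),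
   ("set", "09"), ("setembro", "09"), ("out", "10"), ("outubro", "10"),
   ("nov", "11"), ("novembro", "11"), ("dez", "12"), ("dezembro", "12")]

-- the `for chave, valor in MESES.items(): if mes_ext.startswith(chave): return …` loop
def pvFindMonth (pairs : List (String × String)) (mes_ext : String) : Option String :=
  match pairs with
  | [] => none
  | (chave, valor) :: rest =>
    if PySem.Str.startswith mes_ext chave then some valor else pvFindMonth rest mes_ext

def parse_data_extenso (data_str : String) : Option String :=
  if data_str = "" then none
  else
    -- nothing in the body can raise, so the bare `except: return None` is dead code
    let parts := PySem.Str.split₀ (PySem.Str.replace (PySem.Str.lower data_str) " de " " ")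
    if parts.length < 3 then none
    else
      let dia := PySem.List.pyGetD parts 0 ""
      let mes_ext := PySem.List.pyGetD parts 1 ""
      let ano := PySem.List.pyGetD parts (-1) ""
      match pvFindMonth pvMESES mes_ext with
      | some valor => some (PySem.Str.join "" [PySem.Str.zfill dia 2, "/", valor, "/", ano])
      | none =>
        if PySem.Str.isIn "/" data_str then some (PySem.Str.strip data_str) else none

-- ===== PORT B =====
def pvTABELA : String := "janfevmarabrmaijunjulagosetoutnovdez"

def parse_data_extenso_alt (data_str : String) : Option String :=
  if data_str = "" then none
  else
    let parts := PySem.Str.split₀ (PySem.Str.replace (PySem.Str.lower data_str) " de " " ")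
    if parts.length < 3 then none
    else
      let dia := PySem.List.pyGetD parts 0 ""
      let mes_ext := PySem.List.pyGetD parts 1 ""
      let ano := PySem.List.pyGetD parts (-1) ""
      let p := PySem.Str.slice mes_ext none (some 3)
      let idx := PySem.Str.find pvTABELA p
      if PySem.Str.len p = 3 ∧ idx ≠ -1 ∧ PySem.Int.mod idx 3 = 0 then
        some (PySem.Str.join "" [PySem.Str.zfill dia 2, "/",
          PySem.Str.zfill (PySem.Int.toStr (PySem.Int.floordiv idx 3 + 1)) 2, "/", ano])
      else if PySem.Str.isIn "/" data_str then some (PySem.Str.strip data_str) else none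

-- ===== PRECONDITION & SPEC =====
def Spec_parse_data_extenso (data_str : String) (out : Option String) : Prop := out = parse_data_extenso_alt data_str
instance (data_str : String) (out : Option String) : Decidable (Spec_parse_data_extenso data_str out) := by unfold Spec_parse_data_extenso; infer_instance

-- ===== CLAIM (what is proved, stated in full; the proofs are below) =====
def Claim_equal_parse_data_extenso : Prop := ∀ (data_str : String), Dom_parse_data_extenso data_str → Spec_parse_data_extenso data_str (parse_data_extenso data_str)

-- ===== LEMMAS AND PROOFS =====

-- startswith by a 3-character prefix is exactly "the first three characters are that prefix"
lemma pv_sw3 (m k : List Char) (h : k.length = 3) :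
    PySem.Chars.startswith m k = decide (m.take 3 = k) := by
  have h1 : PySem.Chars.startswith m k = true ↔ m.take 3 = k := by
    rw [PySem.Chars.startswith_iff, List.prefix_iff_eq_take, h, eq_comm]
  rw [Bool.eq_iff_iff]
  simp only [decide_eq_true_eq]
  exact h1

-- one (abbreviation, full name) pair of A's loop collapses to a single test on the first 3 letters
lemma pv_pair_step (m a f v : String) (rest : List (String × String))
    (haf : a.toList <+: f.toList) (ha : a.toList.length = 3) :
    pvFindMonth ((a, v) :: (f, v) :: rest) m
      = if a.toList = m.toList.take 3 then some v else pvFindMonth rest m := by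
  have hsa : PySem.Chars.startswith m.toList a.toList = decide (m.toList.take 3 = a.toList) :=
    pv_sw3 m.toList a.toList ha
  simp only [pvFindMonth, PySem.Str.startswith_eq, hsa]
  by_cases hc : a.toList = m.toList.take 3
  · simp [hc]
  · have hsf : PySem.Chars.startswith m.toList f.toList = false := by
      have hnf : ¬ (f.toList <+: m.toList) := fun hf => by
        have hpre : a.toList <+: m.toList := haf.trans hf
        rw [List.prefix_iff_eq_take, ha] at hpre
        exact hc hpre
      rw [Bool.eq_false_iff]
      intro ht
      exact hnf ((PySem.Chars.startswith_iff _ _).mp ht)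
    have hc' : ¬ (m.toList.take 3 = a.toList) := fun he => hc he.symm
    simp [hc, hc', hsf]

-- A's 24-entry startswith scan computes exactly B's table-position arithmetic
lemma pv_month_eq (m : String) :
    pvFindMonth pvMESES m =
      (let p := PySem.Str.slice m none (some 3)
       let idx := PySem.Str.find pvTABELA p
       if PySem.Str.len p = 3 ∧ idx ≠ -1 ∧ PySem.Int.mod idx 3 = 0 then
         some (PySem.Str.zfill (PySem.Int.toStr (PySem.Int.floordiv idx 3 + 1)) 2)
       else none) := by
  have hx : (PySem.Str.slice m none (some 3)).toList = m.toList.take 3 := by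
    simp [PySem.List.slice_to]
  simp only [pvMESES]
  rw [pv_pair_step m "jan" "janeiro" "01" _ (by decide) (by decide),
      pv_pair_step m "fev" "fevereiro" "02" _ (by decide) (by decide),
      pv_pair_step m "mar" "março" "03" _ (by decide) (by decide),
      pv_pair_step m "abr" "abril" "04" _ (by decide) (by decide),
      pv_pair_step m "mai" "maio" "05" _ (by decide) (by decide),
      pv_pair_step m "jun" "junho" "06" _ (by decide) (by decide),
      pv_pair_step m "jul" "julho" "07" _ (by decide) (by decide),
      pv_pair_step m "ago" "agosto" "08" _ (by decide) (by decide),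
      pv_pair_step m "set" "setembro" "09" _ (by decide) (by decide),
      pv_pair_step m "out" "outubro" "10" _ (by decide) (by decide),
      pv_pair_step m "nov" "novembro" "11" _ (by decide) (by decide),
      pv_pair_step m "dez" "dezembro" "12" [] (by decide) (by decide)]
  simp only [PySem.Str.find_eq, PySem.Str.len_eq, hx]
  set q := m.toList.take 3 with hq
  by_cases h1 : "jan".toList = q
  · rw [if_pos h1, ← h1]; decide
  rw [if_neg h1]
  by_cases h2 : "fev".toList = q
  · rw [if_pos h2, ← h2]; decide
  rw [if_neg h2]
  by_cases h3 : "mar".toList = q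
  · rw [if_pos h3, ← h3]; decide
  rw [if_neg h3]
  by_cases h4 : "abr".toList = q
  · rw [if_pos h4, ← h4]; decide
  rw [if_neg h4]
  by_cases h5 : "mai".toList = q
  · rw [if_pos h5, ← h5]; decide
  rw [if_neg h5]
  by_cases h6 : "jun".toList = q
  · rw [if_pos h6, ← h6]; decide
  rw [if_neg h6]
  by_cases h7 : "jul".toList = q
  · rw [if_pos h7, ← h7]; decide
  rw [if_neg h7]
  by_cases h8 : "ago".toList = q
  · rw [if_pos h8, ← h8]; decide
  rw [if_neg h8]
  by_cases h9 : "set".toList = q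
  · rw [if_pos h9, ← h9]; decide
  rw [if_neg h9]
  by_cases h10 : "out".toList = q
  · rw [if_pos h10, ← h10]; decide
  rw [if_neg h10]
  by_cases h11 : "nov".toList = q
  · rw [if_pos h11, ← h11]; decide
  rw [if_neg h11]
  by_cases h12 : "dez".toList = q
  · rw [if_pos h12, ← h12]; decide
  rw [if_neg h12]
  have hcond : ¬ ((q.length : Int) = 3 ∧ PySem.Chars.find pvTABELA.toList q ≠ -1 ∧
      PySem.Int.mod (PySem.Chars.find pvTABELA.toList q) 3 = 0) := by
    rintro ⟨hlen, hne, hmod⟩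
    set idx := PySem.Chars.find pvTABELA.toList q with hidx
    have h0 : 0 ≤ idx := by
      have := PySem.Chars.neg_one_le_find (s := pvTABELA.toList) (sub := q)
      omega
    obtain ⟨hpre, -⟩ := PySem.Chars.find_spec (s := pvTABELA.toList) (sub := q) h0
    have hqlen : q.length = 3 := by exact_mod_cast hlen
    have hT : pvTABELA.toList.length = 36 := by decide
    have hle : idx.toNat ≤ 33 := by
      have := hpre.length_le
      simp [List.length_drop, hT, hqlen] at this
      omega
    have hmod' : idx % 3 = 0 := by
      rw [PySem.Int.mod_eq_emod_of_pos (by omega : (0:Int) < 3)] at hmod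
      exact hmod
    rw [List.prefix_iff_eq_take, hqlen] at hpre
    have hk : idx.toNat = 0 ∨ idx.toNat = 3 ∨ idx.toNat = 6 ∨ idx.toNat = 9 ∨ idx.toNat = 12 ∨
        idx.toNat = 15 ∨ idx.toNat = 18 ∨ idx.toNat = 21 ∨ idx.toNat = 24 ∨ idx.toNat = 27 ∨
        idx.toNat = 30 ∨ idx.toNat = 33 := by omega
    rcases hk with h | h | h | h | h | h | h | h | h | h | h | h <;> rw [h] at hpre
    · exact h1 (hpre.trans (by decide)).symm
    · exact h2 (hpre.trans (by decide)).symm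
    · exact h3 (hpre.trans (by decide)).symm
    · exact h4 (hpre.trans (by decide)).symm
    · exact h5 (hpre.trans (by decide)).symm
    · exact h6 (hpre.trans (by decide)).symm
    · exact h7 (hpre.trans (by decide)).symm
    · exact h8 (hpre.trans (by decide)).symm
    · exact h9 (hpre.trans (by decide)).symm
    · exact h10 (hpre.trans (by decide)).symm
    · exact h11 (hpre.trans (by decide)).symm
    · exact h12 (hpre.trans (by decide)).symm
  rw [if_neg hcond]
  rfl

-- a `match` on an option that is itself an if-then-some-else-none is that if-then-else
lemma pv_match_if {c : Prop} [Decidable c] {v : String} {X : String → Option String} {Y : Option String} :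
    (match (if c then some v else none) with | some w => X w | none => Y) = if c then X v else Y := by
  split_ifs <;> rfl

-- ===== VERDICT (by name: the statement is the Claim_ definition above) =====
theorem parse_data_extenso_spec : Claim_equal_parse_data_extenso := by
  intro s _
  unfold Spec_parse_data_extenso parse_data_extenso parse_data_extenso_alt
  simp only [pv_month_eq, pv_match_if]
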